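-- pv_equiv track=rewrite | github.com/imklesley/Compiladores | Infixa_para_PosFixa.py | remove_espaco
-- ===== SOURCE A (Python) =====
-- def remove_espaco(infixa):
--     final = []
--     flag = 0
--     for i in range(len(infixa)):
--         if infixa[i] == ' ':
--             flag = 0
--             continue
--         elif infixa[i] == '\\' and flag == 0:
--             flag = infixa[i]
--             flag += infixa[i+1]
--             final.append(flag)
--             flag = 1
--         elif flag != 0:
--             flag = 0
--             continue
--         else:
--             final.append(infixa[i])
--
--     return final
-- ===== SOURCE B (Python) =====
-- def remove_espaco(infixa):
--     segs = infixa.split('\\')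
--     final = [c for c in segs[0] if c != ' ']
--     j = 1
--     while j < len(segs):
--         s = segs[j]
--         if s:
--             final.append('\\' + s[0])
--             final.extend(c for c in s[1:] if c != ' ')
--             j += 1
--         else:
--             nxt = segs[j + 1]   # IndexError on trailing unescaped backslash, like A
--             final.append('\\\\')
--             final.extend(c for c in nxt if c != ' ')
--             j += 2
--     return final
-- ===== Notes on version B (the rewrite author's own statement) =====
-- stated objective: alternative
-- what changed: Replaced A's char-by-char flag state machine by a staged algorithm: split the string on backslashes, emit the first segment's non-space characters, then for each later segment emit the escape pair formed at the segment boundary followed by the segment's remaining non-space characters (an empty segment means the escaped character is the next backslash, consuming two segments).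
import Mathlib
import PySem

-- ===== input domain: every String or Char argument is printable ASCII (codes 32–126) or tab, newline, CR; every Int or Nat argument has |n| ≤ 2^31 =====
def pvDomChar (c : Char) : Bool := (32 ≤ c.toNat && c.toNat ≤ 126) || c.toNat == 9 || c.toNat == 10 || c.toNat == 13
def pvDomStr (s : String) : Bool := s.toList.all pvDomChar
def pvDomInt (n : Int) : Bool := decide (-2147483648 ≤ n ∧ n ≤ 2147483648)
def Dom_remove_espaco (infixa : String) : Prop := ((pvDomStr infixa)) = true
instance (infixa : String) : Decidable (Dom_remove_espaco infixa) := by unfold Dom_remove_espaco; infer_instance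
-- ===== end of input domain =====

-- B replaces A's char-by-char flag state machine by a staged algorithm: split the
-- string on '\' into segments, emit the first segment's non-space chars, then for
-- each later segment emit the escape pair at its boundary and its remaining
-- non-space chars; objective: alternative.

-- ===== PORT A =====
-- A's for-loop over i reads infixa[i] sequentially with a flag state; ported as
-- structural recursion over the character list carrying flag (0 or 1; the string
-- value Python briefly stores in flag is only used locally to build the appended pair).
-- infixa[i+1] is the head of the remaining list; on IndexError (trailing active
-- backslash, excluded by Pre_) the port returns [].
def removeEspacoA : List Char → Int → List String
  | [], _ => []
  | c :: rest, flag =>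
    if c = ' ' then removeEspacoA rest 0
    else if c = '\\' ∧ flag = 0 then
      match rest with
      | d :: _ => String.ofList [c, d] :: removeEspacoA rest 1
      | [] => []  -- Python raises IndexError here (outside Pre_)
    else if flag ≠ 0 then removeEspacoA rest 0
    else String.ofList [c] :: removeEspacoA rest flag

def remove_espaco (infixa : String) : List String := removeEspacoA infixa.toList 0

-- ===== PORT B =====
-- Source B's '[c for c in s if c != ' ']' comprehension over a segment.
def plainSeg (s : List Char) : List String :=
  (s.filter (· ≠ ' ')).map (fun c => String.ofList [c])

-- Source B's while-loop over the segments after the first: a nonempty segment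
-- contributes the pair '\'+s[0] and its tail's non-space chars (j += 1); an empty
-- segment means the escaped char is the next backslash, so it contributes '\\'
-- and the FOLLOWING segment's non-space chars (j += 2).
def segsB : List (List Char) → List String
  | [] => []
  | (c :: tl) :: rest => String.ofList ['\\', c] :: (plainSeg tl ++ segsB rest)
  | [] :: rest =>
    match rest with
    | nxt :: rest' => String.ofList ['\\', '\\'] :: (plainSeg nxt ++ segsB rest')
    | [] => []  -- Python raises IndexError at segs[j+1] here (outside Pre_)

-- infixa.split('\\') is PySem.Chars.splitOn on the char list (exact; sep ≠ "").
-- split always returns a nonempty list; the [] case is unreachable.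
def remove_espaco_alt (infixa : String) : List String :=
  match PySem.Chars.splitOn infixa.toList ['\\'] with
  | s0 :: ss => plainSeg s0 ++ segsB ss
  | [] => []

-- ===== PRECONDITION & SPEC =====
-- Both A and B raise IndexError exactly when the string ends in an unescaped
-- backslash, i.e. when the trailing run of backslashes has odd length; Pre_
-- excludes exactly those inputs.
def Pre_remove_espaco (infixa : String) : Prop :=
  (infixa.toList.reverse.takeWhile (· = '\\')).length % 2 = 0
instance (infixa : String) : Decidable (Pre_remove_espaco infixa) := by
  unfold Pre_remove_espaco; infer_instance
def pvWitness_remove_espaco : String := "a \\b + c"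

def Spec_remove_espaco (infixa : String) (out : List String) : Prop := out = remove_espaco_alt infixa
instance (infixa : String) (out : List String) : Decidable (Spec_remove_espaco infixa out) := by unfold Spec_remove_espaco; infer_instance

-- ===== CLAIM (what is proved, stated in full; the proofs are below) =====
def Claim_equal_remove_espaco : Prop := ∀ (infixa : String), Dom_remove_espaco infixa → Pre_remove_espaco infixa → Spec_remove_espaco infixa (remove_espaco infixa)

-- ===== LEMMAS AND PROOFS =====

-- Pure recursive characterisation of splitting on a single '\'.
def sp : List Char → List (List Char)
  | [] => [[]]
  | c :: rest =>
    if c = '\\' then [] :: sp rest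
    else
      match sp rest with
      | s :: ss => (c :: s) :: ss
      | [] => [[c]]

theorem sp_ne_nil (l : List Char) : sp l ≠ [] := by
  cases l with
  | nil => simp [sp]
  | cons c rest =>
    simp only [sp]
    split
    · simp
    · split <;> simp

-- Prefix the first block of a block list.
def consFst (p : List Char) : List (List Char) → List (List Char)
  | s :: ss => (p ++ s) :: ss
  | [] => []

theorem splitOn_go_spec : ∀ (fuel : Nat) (l cur : List Char) (acc : List (List Char)),
    l.length < fuel →
    PySem.Chars.splitOn.go ['\\'] fuel l cur acc = acc.reverse ++ consFst cur.reverse (sp l) := by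
  intro fuel
  induction fuel with
  | zero => intro l cur acc h; omega
  | succ n ih =>
    intro l cur acc h
    cases l with
    | nil =>
      rw [PySem.Chars.splitOn.go]
      simp [sp, consFst]
      all_goals omega
    | cons c rest =>
      rw [PySem.Chars.splitOn.go.eq_def]
      simp only []
      by_cases hc : c = '\\'
      · have hpre : List.isPrefixOf ['\\'] (c :: rest) = true := by
          simp [List.isPrefixOf, hc]
        simp only [hpre, if_true]
        have hlen : rest.length < n := by simp at h; omega
        rw [show List.drop (List.length ['\\']) (c :: rest) = rest by simp]
        rw [ih rest [] (cur.reverse :: acc) hlen]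
        have hsp : sp (c :: rest) = [] :: sp rest := by simp [sp, hc]
        rw [hsp]
        obtain ⟨s, ss, hss⟩ : ∃ s ss, sp rest = s :: ss := by
          cases hr : sp rest with
          | nil => exact absurd hr (sp_ne_nil rest)
          | cons s ss => exact ⟨s, ss, rfl⟩
        simp [hss, consFst]
      · have hpre : List.isPrefixOf ['\\'] (c :: rest) = false := by
          simp [List.isPrefixOf]
          intro h'; exact absurd h'.symm hc
        simp only [hpre, Bool.false_eq_true, if_false]
        have hlen : rest.length < n := by simp at h; omega
        rw [ih rest (c :: cur) acc hlen]
        have hsp : sp (c :: rest) = match sp rest with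
            | s :: ss => (c :: s) :: ss
            | [] => [[c]] := by simp [sp, hc]
        obtain ⟨s, ss, hss⟩ : ∃ s ss, sp rest = s :: ss := by
          cases hr : sp rest with
          | nil => exact absurd hr (sp_ne_nil rest)
          | cons s ss => exact ⟨s, ss, rfl⟩
        rw [hsp, hss]
        simp [consFst]

theorem splitOn_eq_sp (l : List Char) :
    PySem.Chars.splitOn l ['\\'] = sp l := by
  have h := splitOn_go_spec (l.length + 1) l [] [] (by omega)
  unfold PySem.Chars.splitOn
  rw [h]
  obtain ⟨s, ss, hss⟩ : ∃ s ss, sp l = s :: ss := by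
    cases hr : sp l with
    | nil => exact absurd hr (sp_ne_nil l)
    | cons s ss => exact ⟨s, ss, rfl⟩
  simp [hss, consFst]

-- A backslash with inactive flag appends the pair and activates the flag.
theorem removeEspacoA_bs (d : Char) (rest : List Char) :
    removeEspacoA ('\\' :: d :: rest) 0 = String.ofList ['\\', d] :: removeEspacoA (d :: rest) 1 := by
  simp [removeEspacoA]

-- After an appended escape pair (flag = 1), A skips exactly one character.
theorem removeEspacoA_one (d : Char) (rest : List Char) :
    removeEspacoA (d :: rest) 1 = removeEspacoA rest 0 := by
  by_cases h : d = ' ' <;> simp [removeEspacoA, h]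

-- B's value expressed on the pure split.
def bsem (l : List Char) : List String :=
  match sp l with
  | s0 :: ss => plainSeg s0 ++ segsB ss
  | [] => []

theorem bsem_cons_plain (c : Char) (rest : List Char) (h1 : c ≠ '\\') (h2 : c ≠ ' ') :
    bsem (c :: rest) = String.ofList [c] :: bsem rest := by
  unfold bsem
  obtain ⟨s, ss, hss⟩ : ∃ s ss, sp rest = s :: ss := by
    cases hr : sp rest with
    | nil => exact absurd hr (sp_ne_nil rest)
    | cons s ss => exact ⟨s, ss, rfl⟩
  have : sp (c :: rest) = (c :: s) :: ss := by simp [sp, h1, hss]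
  rw [this, hss]
  simp [plainSeg, h2]

theorem bsem_cons_space (rest : List Char) :
    bsem (' ' :: rest) = bsem rest := by
  unfold bsem
  obtain ⟨s, ss, hss⟩ : ∃ s ss, sp rest = s :: ss := by
    cases hr : sp rest with
    | nil => exact absurd hr (sp_ne_nil rest)
    | cons s ss => exact ⟨s, ss, rfl⟩
  have : sp (' ' :: rest) = (' ' :: s) :: ss := by simp [sp, hss]
  rw [this, hss]
  simp [plainSeg]

theorem removeEspacoA_eq_bsem : ∀ (n : Nat) (l : List Char), l.length ≤ n →
    removeEspacoA l 0 = bsem l := by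
  intro n
  induction n with
  | zero =>
    intro l hl
    simp at hl
    simp [hl, removeEspacoA, bsem, sp, plainSeg, segsB]
  | succ n ih =>
    intro l hl
    match l with
    | [] => simp [removeEspacoA, bsem, sp, plainSeg, segsB]
    | c :: rest =>
      simp at hl
      by_cases hsp : c = ' '
      · subst hsp
        rw [removeEspacoA.eq_def]
        simp [bsem_cons_space, ih rest hl]
      · by_cases hbs : c = '\\'
        · subst hbs
          match rest with
          | [] =>
            rw [removeEspacoA.eq_def]
            simp [bsem, sp, plainSeg, segsB]
          | d :: rest' =>
            have hl' : rest'.length ≤ n := by simp at hl; omega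
            rw [removeEspacoA_bs, removeEspacoA_one, ih rest' hl']
            by_cases hd : d = '\\'
            · subst hd
              obtain ⟨s, ss, hss⟩ : ∃ s ss, sp rest' = s :: ss := by
                cases hr : sp rest' with
                | nil => exact absurd hr (sp_ne_nil rest')
                | cons s ss => exact ⟨s, ss, rfl⟩
              unfold bsem
              have h1 : sp ('\\' :: '\\' :: rest') = [] :: [] :: sp rest' := by
                simp [sp]
              rw [h1, hss]
              simp [plainSeg, segsB]
            · obtain ⟨s, ss, hss⟩ : ∃ s ss, sp rest' = s :: ss := by
                cases hr : sp rest' with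
                | nil => exact absurd hr (sp_ne_nil rest')
                | cons s ss => exact ⟨s, ss, rfl⟩
              unfold bsem
              have h1 : sp ('\\' :: d :: rest') = [] :: (d :: s) :: ss := by
                simp [sp, hd, hss]
              rw [h1, hss]
              simp [plainSeg, segsB]
        · rw [removeEspacoA.eq_def]
          simp only [hsp, if_false]
          rw [if_neg (by simp [hbs]), if_neg (by decide)]
          rw [ih rest hl, bsem_cons_plain c rest hbs hsp]

-- ===== VERDICT (by name: the statement is the Claim_ definition above) =====
theorem remove_espaco_spec : Claim_equal_remove_espaco := by
  intro infixa _ _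
  unfold Spec_remove_espaco remove_espaco remove_espaco_alt
  rw [splitOn_eq_sp]
  exact removeEspacoA_eq_bsem infixa.toList.length infixa.toList le_rfl
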